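-- pv_equiv track=rewrite | github.com/Clara-ang/Listas_Python | prova/7.py | f
-- ===== SOURCE A (Python) =====
-- def f(l01, l02):
--     n = 0
--     for i in range(len(l01)):
--         for j in range(len(l02)):
--             if l01[i] not in l02[j] :
--                 n= n + 1
--                 break
--     return n
-- ===== SOURCE B (Python) =====
-- def f(l01, l02):
--     counts = [0] * len(l01)
--     for item in l02:
--         for i in range(len(l01)):
--             if l01[i] in item:
--                 counts[i] += 1
--     total = 0
--     for i in range(len(l01)):
--         if counts[i] < len(l02):
--             total += 1
--     return total
-- ===== Notes on version B (the rewrite author's own statement) =====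
-- stated objective: alternative
-- what changed: Inverted the loop nesting: B scans l02 in the outer loop maintaining a per-position table of how many items contain each l01 element, then counts positions whose count falls short of len(l02), instead of A's per-element inner scan with a break.
import Mathlib
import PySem

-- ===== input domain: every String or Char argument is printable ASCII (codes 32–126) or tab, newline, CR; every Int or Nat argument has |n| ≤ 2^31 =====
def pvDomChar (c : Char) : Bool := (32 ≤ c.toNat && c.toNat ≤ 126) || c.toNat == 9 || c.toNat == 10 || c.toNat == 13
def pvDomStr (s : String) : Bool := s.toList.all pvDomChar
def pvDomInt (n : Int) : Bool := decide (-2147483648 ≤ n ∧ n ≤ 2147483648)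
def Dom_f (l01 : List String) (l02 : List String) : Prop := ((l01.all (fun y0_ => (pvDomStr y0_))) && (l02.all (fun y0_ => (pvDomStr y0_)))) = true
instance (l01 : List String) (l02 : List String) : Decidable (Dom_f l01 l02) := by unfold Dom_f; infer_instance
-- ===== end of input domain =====

-- B inverts A's loop nesting: a per-position count table over l02, then a final pass comparing
-- each count with len(l02); alternative decomposition, same asymptotic cost.


-- ===== PORT A =====
-- inner loop 'for j in range(len(l02)): if l01[i] not in l02[j]: n += 1; break'
-- returns the contribution (0 or 1) of one element of l01
def fInner (x : String) : List String → Int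
  | [] => 0
  | t :: rest => if PySem.Str.isIn x t = false then 1 else fInner x rest

def f (l01 : List String) (l02 : List String) : Int :=
  l01.foldl (fun n x => n + fInner x l02) 0

-- ===== PORT B =====
def f_alt (l01 : List String) (l02 : List String) : Int :=
  let counts : List Int :=
    l02.foldl
      (fun cs item => List.zipWith (fun c x => if PySem.Str.isIn x item then c + 1 else c) cs l01)
      (l01.map (fun _ => 0))
  counts.foldl (fun total c => if c < (l02.length : Int) then total + 1 else total) 0

-- ===== PRECONDITION & SPEC =====
def Spec_f (l01 : List String) (l02 : List String) (out : Int) : Prop := out = f_alt l01 l02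
instance (l01 : List String) (l02 : List String) (out : Int) : Decidable (Spec_f l01 l02 out) := by unfold Spec_f; infer_instance

-- ===== CLAIM (what is proved, stated in full; the proofs are below) =====
def Claim_equal_f : Prop := ∀ (l01 : List String) (l02 : List String), Dom_f l01 l02 → Spec_f l01 l02 (f l01 l02)

-- ===== LEMMAS AND PROOFS =====

-- A's inner loop returns 1 iff not every item of l02 contains x
theorem fInner_eq (x : String) (l02 : List String) :
    fInner x l02 = if l02.countP (fun t => PySem.Str.isIn x t) < l02.length then 1 else 0 := by
  induction l02 with
  | nil => simp [fInner]
  | cons t rest ih =>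
    cases hb : PySem.Str.isIn x t with
    | false =>
      have hc := List.countP_le_length (p := fun t => PySem.Str.isIn x t) (l := rest)
      simp only [fInner, hb, List.countP_cons, List.length_cons, Bool.false_eq_true,
        if_false, if_true, eq_self_iff_true, add_zero]
      rw [if_pos (by omega)]
    | true =>
      simp only [fInner, hb, Bool.true_eq_false, if_false, ih, List.countP_cons,
        List.length_cons, if_true, eq_self_iff_true]
      simp only [Nat.add_lt_add_iff_right]

-- one step of B's outer loop, pointwise on the count table
theorem zip_step (l01 : List String) (item : String) (g : String → Int) :
    List.zipWith (fun c x => if PySem.Str.isIn x item then c + 1 else c) (l01.map g) l01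
    = l01.map (fun x => if PySem.Str.isIn x item then g x + 1 else g x) := by
  induction l01 with
  | nil => rfl
  | cons y ys ihy =>
    simp only [List.map_cons, List.zipWith_cons_cons, ihy]

-- B's count table after the outer fold: position i holds the number of items containing l01[i]
theorem counts_eq (l01 : List String) (l02 : List String) (g : String → Int) :
    l02.foldl
      (fun cs item => List.zipWith (fun c x => if PySem.Str.isIn x item then c + 1 else c) cs l01)
      (l01.map g)
    = l01.map (fun x => g x + (l02.countP (fun t => PySem.Str.isIn x t) : Int)) := by
  induction l02 generalizing g with
  | nil => simp
  | cons item rest ih =>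
    simp only [List.foldl_cons, zip_step, ih]
    apply List.map_congr_left
    intro x _
    cases hx : PySem.Str.isIn x item with
    | false =>
      simp only [hx, Bool.false_eq_true, if_false, List.countP_cons, hx, add_zero]
    | true =>
      simp only [hx, if_true, List.countP_cons, List.length_cons]
      push_cast
      ring

-- final pass of B = countP of the same predicate
theorem foldl_if_lt (len : Nat) (l : List Int) (a : Int) :
    l.foldl (fun total c => if c < (len : Int) then total + 1 else total) a
    = a + (l.countP (fun c => decide (c < (len : Int))) : Int) := by
  induction l generalizing a with
  | nil => simp
  | cons c cs ih =>
    by_cases h : c < (len : Int) <;>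
      simp only [List.foldl_cons, h, if_true, if_false, List.countP_cons, ih,
        decide_eq_true_eq, decide_eq_false_iff_not] <;>
      simp [h] <;> push_cast <;> ring

-- fold of A = countP of the shortfall predicate
theorem foldl_fInner (l01 : List String) (l02 : List String) (a : Int) :
    l01.foldl (fun n x => n + fInner x l02) a
    = a + (l01.countP (fun x => decide (l02.countP (fun t => PySem.Str.isIn x t) < l02.length)) : Int) := by
  induction l01 generalizing a with
  | nil => simp
  | cons x xs ih =>
    rw [List.foldl_cons, ih, fInner_eq, List.countP_cons]
    by_cases h : l02.countP (fun t => PySem.Str.isIn x t) < l02.length <;>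
      simp only [h, if_true, if_false, decide_true, decide_false, decide_eq_true_eq] <;>
      simp [h] <;> push_cast <;> ring

-- ===== VERDICT (by name: the statement is the Claim_ definition above) =====
theorem f_spec : Claim_equal_f := by
  intro l01 l02 _
  unfold Spec_f f f_alt
  rw [counts_eq l01 l02 (fun _ => 0), foldl_fInner, foldl_if_lt, List.countP_map]
  simp only [zero_add]
  congr 1
  norm_cast
  apply List.countP_congr
  intro x _
  simp [Function.comp]
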